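-- pv_equiv track=rewrite | github.com/DanyaMr/YandexTraining8 | first_week/1_F.py | find_max_in_list
-- ===== SOURCE A (Python) =====
-- def arr_sum_rows(arr, n, m):
--
--     arr_rows = list()
--     counter_minus = 0
--     counter_plus = 0
--     counter_question = 0
--     for i in range(n):
--         for j in range(m):
--             if arr[i][j] == '+':
--                 counter_plus += 1
--             elif arr[i][j] == '-':
--                 counter_minus += 1
--             else:
--                 counter_question += 1
--
--         current_sum = counter_plus + counter_question - counter_minus
--         counter_minus = 0
--         counter_plus = 0
--         counter_question = 0
--         arr_rows.append(current_sum)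
--
--     return arr_rows
--
-- def arr_sum_columns(arr, n, m):
--
--     arr_columns = list()
--     counter_minus = 0
--     counter_plus = 0
--     counter_question = 0
--     for i in range(m):
--         for j in range(n):
--             if arr[j][i] == '+':
--                 counter_plus += 1
--             elif arr[j][i] == '-':
--                 counter_minus += 1
--             else:
--                 counter_question += 1
--
--         current_sum = counter_plus - counter_question - counter_minus
--         counter_minus = 0
--         counter_plus = 0
--         counter_question = 0
--         arr_columns.append(current_sum)
--
--     return arr_columns
--
-- def find_max(arr, n, m):
--     arr_rows = arr_sum_rows(arr, n, m)
--     arr_columns = arr_sum_columns(arr, n, m)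
--     res = [[] for _ in range(n)]
--     for i in range(len(arr_rows)):
--         for j in range(len(arr_columns)):
--             if arr[i][j] == '?':
--                 res[i].append(arr_rows[i] - 2 - arr_columns[j])
--             else:
--                 res[i].append(arr_rows[i] - arr_columns[j])
--     return res
--
-- def find_max_in_list(arr, n, m):
--     res = find_max(arr, n, m)
--     max = res[0][0]
--     for i in range(n):
--         for j in range(m):
--             if res[i][j] >= max:
--                 max = res[i][j]
--     return max
-- ===== SOURCE B (Python) =====
-- def find_max_in_list(arr, n, m):
--     # score(i,j) = rowsum[i] - colsum[j] - 2*(arr[i][j]=='?') = n + m - 2*(minus_i + plus_j + (arr[i][j]=='?'))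
--     # where minus_i = #'-' in row i and plus_j = #'+' in column j.  For a fixed row the best column is
--     # always one of minimum plus_j (any other column costs at least pmin+1 even before the '?' penalty),
--     # so precompute the argmin-column set once and minimise a per-row cost in a single pass over rows.
--     plus = [sum(1 for i in range(n) if arr[i][j] == '+') for j in range(m)]
--     pmin = min(plus)
--     amin = [j for j in range(m) if plus[j] == pmin]
--     best = None
--     for i in range(n):
--         minus_i = sum(1 for j in range(m) if arr[i][j] == '-')
--         inc = 0 if any(arr[i][j] != '?' for j in amin) else 1
--         cost = minus_i + pmin + inc
--         if best is None or cost < best: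
--             best = cost
--     return n + m - 2 * best
-- ===== Notes on version B (the rewrite author's own statement) =====
-- stated objective: alternative
-- what changed: B replaces A's full n*m score matrix and nested max scan by an arithmetic reformulation: score(i,j) = n+m-2*(minus_i+plus_j+[cell=='?']), and since the optimal column for every row lies in the set of columns with minimal '+'-count, B precomputes that argmin set once and minimises a per-row cost in a single pass over rows instead of maximising over all (i,j) pairs.
import Mathlib
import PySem

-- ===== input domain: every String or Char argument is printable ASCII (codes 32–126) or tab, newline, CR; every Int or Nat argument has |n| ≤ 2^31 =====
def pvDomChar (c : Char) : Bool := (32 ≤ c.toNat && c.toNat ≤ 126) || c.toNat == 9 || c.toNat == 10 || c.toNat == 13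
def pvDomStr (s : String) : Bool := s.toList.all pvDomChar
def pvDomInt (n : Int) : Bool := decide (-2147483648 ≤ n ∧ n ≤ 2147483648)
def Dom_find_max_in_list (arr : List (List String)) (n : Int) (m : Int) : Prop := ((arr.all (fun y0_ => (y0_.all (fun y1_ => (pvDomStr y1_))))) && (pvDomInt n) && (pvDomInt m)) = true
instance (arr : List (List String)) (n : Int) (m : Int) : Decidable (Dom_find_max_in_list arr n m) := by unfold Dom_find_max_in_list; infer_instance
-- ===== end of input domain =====

-- B reformulates the score as n+m-2*(minus_i+plus_j+[cell='?']) and, since the best column of every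
-- row lies in the set of columns with minimal '+'-count, minimises a per-row cost in one pass over the
-- rows using that precomputed argmin set, never forming A's score matrix (objective: alternative).

-- ===== PORT A =====
-- Out-of-range indexing defaults (getD) stand in for Python's IndexError; Pre_ excludes those inputs.
def arr_sum_rows (arr : List (List String)) (n : Int) (m : Int) : List Int :=
  (PySem.List.pyRange 0 n 1).foldl (fun acc i =>
    let c := (PySem.List.pyRange 0 m 1).foldl (fun (c : Int × Int × Int) j =>
      let s := PySem.List.pyGetD (PySem.List.pyGetD arr i []) j ""
      if s = "+" then (c.1 + 1, c.2.1, c.2.2)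
      else if s = "-" then (c.1, c.2.1 + 1, c.2.2)
      else (c.1, c.2.1, c.2.2 + 1)) (0, 0, 0)
    acc ++ [c.1 + c.2.2 - c.2.1]) []

def arr_sum_columns (arr : List (List String)) (n : Int) (m : Int) : List Int :=
  (PySem.List.pyRange 0 m 1).foldl (fun acc i =>
    let c := (PySem.List.pyRange 0 n 1).foldl (fun (c : Int × Int × Int) j =>
      let s := PySem.List.pyGetD (PySem.List.pyGetD arr j []) i ""
      if s = "+" then (c.1 + 1, c.2.1, c.2.2)
      else if s = "-" then (c.1, c.2.1 + 1, c.2.2)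
      else (c.1, c.2.1, c.2.2 + 1)) (0, 0, 0)
    acc ++ [c.1 - c.2.2 - c.2.1]) []

def find_max (arr : List (List String)) (n : Int) (m : Int) : List (List Int) :=
  let arr_rows := arr_sum_rows arr n m
  let arr_columns := arr_sum_columns arr n m
  (PySem.List.pyRange 0 (arr_rows.length : Int) 1).foldl (fun res i =>
    res ++ [(PySem.List.pyRange 0 (arr_columns.length : Int) 1).foldl (fun row j =>
      row ++ [if PySem.List.pyGetD (PySem.List.pyGetD arr i []) j "" = "?"
              then PySem.List.pyGetD arr_rows i 0 - 2 - PySem.List.pyGetD arr_columns j 0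
              else PySem.List.pyGetD arr_rows i 0 - PySem.List.pyGetD arr_columns j 0]) []]) []

def find_max_in_list (arr : List (List String)) (n : Int) (m : Int) : Int :=
  let res := find_max arr n m
  let max0 := PySem.List.pyGetD (PySem.List.pyGetD res 0 []) 0 0
  (PySem.List.pyRange 0 n 1).foldl (fun mx i =>
    (PySem.List.pyRange 0 m 1).foldl (fun mx j =>
      let v := PySem.List.pyGetD (PySem.List.pyGetD res i []) j 0
      if v ≥ mx then v else mx) mx) max0

-- ===== PORT B =====
-- min(plus) on an empty list raises ValueError in Python (m = 0); .getD 0 stands in, outside Pre_.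
def find_max_in_list_alt (arr : List (List String)) (n : Int) (m : Int) : Int :=
  let plus := (PySem.List.pyRange 0 m 1).map (fun j =>
    (PySem.List.pyRange 0 n 1).foldl (fun s i =>
      if PySem.List.pyGetD (PySem.List.pyGetD arr i []) j "" = "+" then s + 1 else s) (0 : Int))
  let pmin := (PySem.List.min? plus (fun x => x)).getD 0
  let amin := (PySem.List.pyRange 0 m 1).filter (fun j => PySem.List.pyGetD plus j 0 == pmin)
  let best := (PySem.List.pyRange 0 n 1).foldl (fun (best : Option Int) i =>
    let minus_i := (PySem.List.pyRange 0 m 1).foldl (fun s j =>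
      if PySem.List.pyGetD (PySem.List.pyGetD arr i []) j "" = "-" then s + 1 else s) (0 : Int)
    let inc : Int := if (amin.any (fun j => !(PySem.List.pyGetD (PySem.List.pyGetD arr i []) j "" == "?"))) then 0 else 1
    let cost := minus_i + pmin + inc
    match best with
    | none => some cost
    | some b => if cost < b then some cost else some b) none
  n + m - 2 * best.getD 0

-- ===== PRECONDITION & SPEC =====
-- Pre_: exactly the inputs on which Python A returns (otherwise res[0][0] or arr[i][j] raises IndexError):
-- positive n and m, at least n rows, and each of the first n rows has at least m entries.
def Pre_find_max_in_list (arr : List (List String)) (n : Int) (m : Int) : Prop :=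
  0 < n ∧ 0 < m ∧ n ≤ (arr.length : Int) ∧ ∀ row ∈ arr.take n.toNat, m ≤ (row.length : Int)
instance (arr : List (List String)) (n : Int) (m : Int) : Decidable (Pre_find_max_in_list arr n m) := by unfold Pre_find_max_in_list; infer_instance
def pvWitness_find_max_in_list : List (List String) × Int × Int := ([["+", "-"], ["?", "+"]], 2, 2)

def Spec_find_max_in_list (arr : List (List String)) (n : Int) (m : Int) (out : Int) : Prop := out = find_max_in_list_alt arr n m
instance (arr : List (List String)) (n : Int) (m : Int) (out : Int) : Decidable (Spec_find_max_in_list arr n m out) := by unfold Spec_find_max_in_list; infer_instance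

-- ===== CLAIM (what is proved, stated in full; the proofs are below) =====
def Claim_equal_find_max_in_list : Prop := ∀ (arr : List (List String)) (n : Int) (m : Int), Dom_find_max_in_list arr n m → Pre_find_max_in_list arr n m → Spec_find_max_in_list arr n m (find_max_in_list arr n m)

-- ===== LEMMAS AND PROOFS =====

-- the cell access both ports perform
def pvCell (arr : List (List String)) (i j : Int) : String :=
  PySem.List.pyGetD (PySem.List.pyGetD arr i []) j ""

-- the counter step of A's inner loops
def pvStep (f : Int → String) (p : Int × Int × Int) (j : Int) : Int × Int × Int :=
  let s := f j
  if s = "+" then (p.1 + 1, p.2.1, p.2.2)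
  else if s = "-" then (p.1, p.2.1 + 1, p.2.2)
  else (p.1, p.2.1, p.2.2 + 1)

theorem counters_rows (f : Int → String) (l : List Int) (a b c : Int) :
    (l.foldl (pvStep f) (a, b, c)).1 + (l.foldl (pvStep f) (a, b, c)).2.2
      - (l.foldl (pvStep f) (a, b, c)).2.1 =
    a + c - b + (l.map (fun j => if f j = "-" then (-1 : Int) else 1)).sum := by
  induction l generalizing a b c with
  | nil => simp
  | cons j t ih =>
    simp only [List.foldl_cons, List.map_cons, List.sum_cons]
    by_cases h1 : f j = "+"
    · have h2 : f j ≠ "-" := by rw [h1]; decide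
      rw [show pvStep f (a, b, c) j = (a + 1, b, c) from by simp [pvStep, h1], ih, if_neg h2]
      ring
    · by_cases h2 : f j = "-"
      · rw [show pvStep f (a, b, c) j = (a, b + 1, c) from by simp [pvStep, h2], ih, if_pos h2]
        ring
      · rw [show pvStep f (a, b, c) j = (a, b, c + 1) from by simp [pvStep, h1, h2], ih, if_neg h2]
        ring

theorem counters_rows0 (f : Int → String) (l : List Int) :
    (l.foldl (pvStep f) (0, 0, 0)).1 + (l.foldl (pvStep f) (0, 0, 0)).2.2
      - (l.foldl (pvStep f) (0, 0, 0)).2.1 =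
    (l.map (fun j => if f j = "-" then (-1 : Int) else 1)).sum := by
  simpa using counters_rows f l 0 0 0

theorem counters_cols (f : Int → String) (l : List Int) (a b c : Int) :
    (l.foldl (pvStep f) (a, b, c)).1 - (l.foldl (pvStep f) (a, b, c)).2.2
      - (l.foldl (pvStep f) (a, b, c)).2.1 =
    a - c - b + (l.map (fun j => if f j = "+" then (1 : Int) else -1)).sum := by
  induction l generalizing a b c with
  | nil => simp
  | cons j t ih =>
    simp only [List.foldl_cons, List.map_cons, List.sum_cons]
    by_cases h1 : f j = "+"
    · rw [show pvStep f (a, b, c) j = (a + 1, b, c) from by simp [pvStep, h1], ih, if_pos h1]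
      ring
    · by_cases h2 : f j = "-"
      · rw [show pvStep f (a, b, c) j = (a, b + 1, c) from by simp [pvStep, h2], ih, if_neg h1]
        ring
      · rw [show pvStep f (a, b, c) j = (a, b, c + 1) from by simp [pvStep, h1, h2], ih, if_neg h1]
        ring

theorem counters_cols0 (f : Int → String) (l : List Int) :
    (l.foldl (pvStep f) (0, 0, 0)).1 - (l.foldl (pvStep f) (0, 0, 0)).2.2
      - (l.foldl (pvStep f) (0, 0, 0)).2.1 =
    (l.map (fun j => if f j = "+" then (1 : Int) else -1)).sum := by
  simpa using counters_cols f l 0 0 0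

-- B's per-row and per-column signed sums and the per-cell score A maximises
def pvRowVal (arr : List (List String)) (m i : Int) : Int :=
  ((PySem.List.pyRange 0 m 1).map (fun j => if pvCell arr i j = "-" then (-1 : Int) else 1)).sum

def pvColVal (arr : List (List String)) (n j : Int) : Int :=
  ((PySem.List.pyRange 0 n 1).map (fun i => if pvCell arr i j = "+" then (1 : Int) else -1)).sum

def pvScore (arr : List (List String)) (n m i j : Int) : Int :=
  pvRowVal arr m i - pvColVal arr n j - (if pvCell arr i j = "?" then 2 else 0)

-- A's rowsum list
theorem rows_eq (arr : List (List String)) (n m : Int) :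
    arr_sum_rows arr n m = (PySem.List.pyRange 0 n 1).map (fun i =>
      ((PySem.List.pyRange 0 m 1).map (fun j =>
        if pvCell arr i j = "-" then (-1 : Int) else 1)).sum) := by
  unfold arr_sum_rows
  rw [PySem.List.foldl_append_singleton_eq_map]
  simp only [List.nil_append]
  apply List.map_congr_left
  intro i _
  exact counters_rows0 (fun j => pvCell arr i j) (PySem.List.pyRange 0 m 1)

-- A's colsum list
theorem cols_eq (arr : List (List String)) (n m : Int) :
    arr_sum_columns arr n m = (PySem.List.pyRange 0 m 1).map (fun j =>
      ((PySem.List.pyRange 0 n 1).map (fun i =>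
        if pvCell arr i j = "+" then (1 : Int) else -1)).sum) := by
  unfold arr_sum_columns
  rw [PySem.List.foldl_append_singleton_eq_map]
  simp only [List.nil_append]
  apply List.map_congr_left
  intro j _
  exact counters_cols0 (fun i => pvCell arr i j) (PySem.List.pyRange 0 n 1)

-- A's matrix entry, and its identity with the score
def pvM (arr : List (List String)) (n m i j : Int) : Int :=
  if pvCell arr i j = "?" then pvRowVal arr m i - 2 - pvColVal arr n j
  else pvRowVal arr m i - pvColVal arr n j

theorem pvM_eq_score (arr : List (List String)) (n m i j : Int) :
    pvM arr n m i j = pvScore arr n m i j := by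
  unfold pvM pvScore
  split_ifs <;> ring

theorem pyRange_cast_toNat (n : Int) :
    PySem.List.pyRange 0 ((n.toNat : Int)) 1 = PySem.List.pyRange 0 n 1 := by
  rw [PySem.List.pyRange_one, PySem.List.pyRange_one]
  simp only [sub_zero, Int.toNat_natCast]

-- the maximisation A computes
def pvBigMax (arr : List (List String)) (n m : Int) : Int :=
  (PySem.List.pyRange 0 n 1).foldl (fun mx i =>
    (PySem.List.pyRange 0 m 1).foldl (fun mx j =>
      max mx (pvScore arr n m i j)) mx) (pvScore arr n m 0 0)

theorem matrix_eq (arr : List (List String)) (n m : Int) :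
    find_max arr n m = (PySem.List.pyRange 0 n 1).map (fun i =>
      (PySem.List.pyRange 0 m 1).map (fun j => pvM arr n m i j)) := by
  simp only [find_max]
  rw [rows_eq, cols_eq]
  rw [List.length_map, List.length_map, PySem.List.length_pyRange_one, PySem.List.length_pyRange_one]
  simp only [sub_zero]
  rw [pyRange_cast_toNat n, pyRange_cast_toNat m]
  rw [PySem.List.foldl_append_singleton_eq_map]
  simp only [List.nil_append]
  apply List.map_congr_left
  intro i hi
  rw [PySem.List.foldl_append_singleton_eq_map]
  simp only [List.nil_append]
  apply List.map_congr_left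
  intro j hj
  obtain ⟨hi0, hin⟩ := (PySem.List.mem_pyRange_one).1 hi
  obtain ⟨hj0, hjm⟩ := (PySem.List.mem_pyRange_one).1 hj
  rw [PySem.List.pyGetD_map_pyRange_of_nonneg _ n i 0 hi0 hin,
      PySem.List.pyGetD_map_pyRange_of_nonneg _ m j 0 hj0 hjm]
  rfl

theorem A_eq (arr : List (List String)) (n m : Int) (hn : 0 < n) (hm : 0 < m) :
    find_max_in_list arr n m = pvBigMax arr n m := by
  simp only [find_max_in_list, pvBigMax]
  rw [matrix_eq]
  rw [PySem.List.pyGetD_map_pyRange_of_nonneg _ n 0 [] le_rfl hn,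
      PySem.List.pyGetD_map_pyRange_of_nonneg _ m 0 0 le_rfl hm,
      pvM_eq_score]
  apply PySem.List.foldl_congr_mem
  intro acc i hi
  apply PySem.List.foldl_congr_mem
  intro acc2 j hj
  obtain ⟨hi0, hin⟩ := (PySem.List.mem_pyRange_one).1 hi
  obtain ⟨hj0, hjm⟩ := (PySem.List.mem_pyRange_one).1 hj
  rw [PySem.List.pyGetD_map_pyRange_of_nonneg _ n i [] hi0 hin,
      PySem.List.pyGetD_map_pyRange_of_nonneg _ m j 0 hj0 hjm,
      pvM_eq_score]
  rcases le_or_gt (pvScore arr n m i j) acc2 with h | h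
  · rw [max_eq_left h]
    split_ifs <;> omega
  · rw [max_eq_right h.le]
    split_ifs <;> omega

-- ===== B-side abstractions =====
def pvQ (arr : List (List String)) (i j : Int) : Int := if pvCell arr i j = "?" then 1 else 0

def pvPlus (arr : List (List String)) (n j : Int) : Int :=
  (PySem.List.pyRange 0 n 1).foldl (fun s i => if pvCell arr i j = "+" then s + 1 else s) 0

def pvMinus (arr : List (List String)) (m i : Int) : Int :=
  (PySem.List.pyRange 0 m 1).foldl (fun s j => if pvCell arr i j = "-" then s + 1 else s) 0

def pvPlusList (arr : List (List String)) (n m : Int) : List Int :=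
  (PySem.List.pyRange 0 m 1).map (fun j => pvPlus arr n j)

def pvPmin (arr : List (List String)) (n m : Int) : Int :=
  (PySem.List.min? (pvPlusList arr n m) (fun x => x)).getD 0

def pvAmin (arr : List (List String)) (n m : Int) : List Int :=
  (PySem.List.pyRange 0 m 1).filter (fun j => PySem.List.pyGetD (pvPlusList arr n m) j 0 == pvPmin arr n m)

def pvInc (arr : List (List String)) (n m i : Int) : Int :=
  if (pvAmin arr n m).any (fun j => !(pvCell arr i j == "?")) then 0 else 1

def pvCost (arr : List (List String)) (n m i j : Int) : Int :=
  pvMinus arr m i + (pvPlus arr n j + pvQ arr i j)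

def pvRowcost (arr : List (List String)) (n m i : Int) : Int :=
  pvMinus arr m i + pvPmin arr n m + pvInc arr n m i

theorem sum_pm_neg (l : List Int) (p : Int → Prop) [DecidablePred p] :
    (l.map (fun x => if p x then (-1 : Int) else 1)).sum
      = (l.length : Int) - 2 * (l.foldl (fun s x => if p x then s + 1 else s) (0 : Int)) := by
  rw [PySem.List.foldl_ite_add_one]
  induction l with
  | nil => simp
  | cons x t ih =>
    simp only [List.map_cons, List.sum_cons, List.countP_cons, List.length_cons]
    by_cases h : p x <;> simp only [h, if_pos, if_neg, decide_true, decide_false,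
      not_false_eq_true] <;> push_cast <;> omega

theorem sum_pm_pos (l : List Int) (p : Int → Prop) [DecidablePred p] :
    (l.map (fun x => if p x then (1 : Int) else -1)).sum
      = 2 * (l.foldl (fun s x => if p x then s + 1 else s) (0 : Int)) - (l.length : Int) := by
  rw [PySem.List.foldl_ite_add_one]
  induction l with
  | nil => simp
  | cons x t ih =>
    simp only [List.map_cons, List.sum_cons, List.countP_cons, List.length_cons]
    by_cases h : p x <;> simp only [h, if_pos, if_neg, decide_true, decide_false,
      not_false_eq_true] <;> push_cast <;> omega

theorem score_eq_cost (arr : List (List String)) (n m i j : Int) (hn : 0 ≤ n) (hm : 0 ≤ m) :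
    pvScore arr n m i j = n + m - 2 * pvCost arr n m i j := by
  have hr : pvRowVal arr m i = m - 2 * pvMinus arr m i := by
    unfold pvRowVal pvMinus
    rw [sum_pm_neg, PySem.List.length_pyRange_one]
    omega
  have hc : pvColVal arr n j = 2 * pvPlus arr n j - n := by
    unfold pvColVal pvPlus
    rw [sum_pm_pos, PySem.List.length_pyRange_one]
    omega
  unfold pvScore pvCost pvQ
  rw [hr, hc]
  split_ifs <;> ring

-- nested fold over rows ↔ fold over the flattened list
theorem nested_foldl (op : Int → Int → Int) (li lj : List Int) (f : Int → Int → Int) (a : Int) :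
    li.foldl (fun a i => lj.foldl (fun a j => op a (f i j)) a) a
      = (li.flatMap (fun i => lj.map (f i))).foldl op a := by
  induction li generalizing a with
  | nil => simp
  | cons i t ih => simp [List.foldl_append, List.foldl_map, ih]

theorem foldl_max_affine (K : Int) (S : List Int) (c0 : Int) :
    (S.map (fun c => K - 2 * c)).foldl max (K - 2 * c0) = K - 2 * S.foldl min c0 := by
  induction S generalizing c0 with
  | nil => simp
  | cons c t ih =>
    simp only [List.map_cons, List.foldl_cons]
    rw [show max (K - 2 * c0) (K - 2 * c) = K - 2 * min c0 c from by
      rcases le_total c0 c with h | h <;> simp [max_def, h] <;> omega]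
    exact ih (min c0 c)

theorem foldl_min_of (l : List Int) (v a : Int) (hmem : v ∈ l) (hle : ∀ x ∈ l, v ≤ x) :
    l.foldl min a = min a v := by
  have h1 := PySem.List.foldl_min_le l a
  have h2 := PySem.List.foldl_min_mem l a
  apply le_antisymm
  · exact le_min h1.1 (h1.2 v hmem)
  · rcases h2 with h | h
    · rw [h]; exact min_le_left a v
    · exact le_trans (min_le_right a v) (hle _ h)

-- pmin is a lower bound of the column plus-counts and is attained
theorem pmin_le (arr : List (List String)) (n m j : Int) (h0 : 0 ≤ j) (hj : j < m) :
    pvPmin arr n m ≤ pvPlus arr n j := by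
  have hm0 : 0 < m := by omega
  have hmemj : pvPlus arr n j ∈ pvPlusList arr n m := by
    unfold pvPlusList
    exact List.mem_map.2 ⟨j, PySem.List.mem_pyRange_one.2 ⟨h0, hj⟩, rfl⟩
  cases hv : PySem.List.min? (pvPlusList arr n m) (fun x => x) with
  | none =>
    exfalso
    have := (PySem.List.min?_eq_none_iff (pvPlusList arr n m) (fun x => x)).1 hv
    rw [this] at hmemj
    exact (List.not_mem_nil) hmemj
  | some v =>
    have := PySem.List.min?_isMin hv (pvPlus arr n j) hmemj
    unfold pvPmin
    rw [hv]
    exact this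

theorem pmin_attained (arr : List (List String)) (n m : Int) (hm : 0 < m) :
    ∃ j, 0 ≤ j ∧ j < m ∧ pvPlus arr n j = pvPmin arr n m := by
  cases hv : PySem.List.min? (pvPlusList arr n m) (fun x => x) with
  | none =>
    exfalso
    have h0 : (0 : Int) ∈ PySem.List.pyRange 0 m 1 := PySem.List.mem_pyRange_one.2 ⟨le_rfl, hm⟩
    have : pvPlus arr n 0 ∈ pvPlusList arr n m := List.mem_map.2 ⟨0, h0, rfl⟩
    rw [(PySem.List.min?_eq_none_iff (pvPlusList arr n m) (fun x => x)).1 hv] at this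
    exact (List.not_mem_nil) this
  | some v =>
    have hmem := PySem.List.min?_mem hv
    unfold pvPlusList at hmem
    obtain ⟨j, hj, hje⟩ := List.mem_map.1 hmem
    obtain ⟨hj0, hjm⟩ := PySem.List.mem_pyRange_one.1 hj
    refine ⟨j, hj0, hjm, ?_⟩
    unfold pvPmin
    rw [hv, hje]
    rfl

theorem mem_amin (arr : List (List String)) (n m j : Int) :
    j ∈ pvAmin arr n m ↔ (0 ≤ j ∧ j < m) ∧ pvPlus arr n j = pvPmin arr n m := by
  unfold pvAmin
  rw [List.mem_filter]
  constructor
  · rintro ⟨hjr, hp⟩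
    obtain ⟨h0, hj⟩ := PySem.List.mem_pyRange_one.1 hjr
    refine ⟨⟨h0, hj⟩, ?_⟩
    rw [show PySem.List.pyGetD (pvPlusList arr n m) j 0 = pvPlus arr n j from by
      unfold pvPlusList; exact PySem.List.pyGetD_map_pyRange_of_nonneg _ m j 0 h0 hj] at hp
    exact beq_iff_eq.1 hp
  · rintro ⟨⟨h0, hj⟩, hp⟩
    refine ⟨PySem.List.mem_pyRange_one.2 ⟨h0, hj⟩, ?_⟩
    rw [show PySem.List.pyGetD (pvPlusList arr n m) j 0 = pvPlus arr n j from by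
      unfold pvPlusList; exact PySem.List.pyGetD_map_pyRange_of_nonneg _ m j 0 h0 hj]
    exact beq_iff_eq.2 hp

theorem rowcost_le (arr : List (List String)) (n m i j : Int) (h0 : 0 ≤ j) (hj : j < m) :
    pvRowcost arr n m i ≤ pvCost arr n m i j := by
  have hq : 0 ≤ pvQ arr i j := by unfold pvQ; split_ifs <;> omega
  have hple := pmin_le arr n m j h0 hj
  unfold pvRowcost pvCost pvInc
  cases ha : (pvAmin arr n m).any (fun j => !(pvCell arr i j == "?")) with
  | true => simp only [if_pos]; omega
  | false =>
    simp only [Bool.false_eq_true, if_neg, not_false_eq_true]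
    by_cases hp : pvPlus arr n j = pvPmin arr n m
    · have hjam : j ∈ pvAmin arr n m := (mem_amin arr n m j).2 ⟨⟨h0, hj⟩, hp⟩
      have hall := List.any_eq_false.1 ha _ hjam
      have hcq : pvCell arr i j = "?" := by
        by_contra hne
        exact hall (by simp [hne])
      have : pvQ arr i j = 1 := by unfold pvQ; rw [if_pos hcq]
      omega
    · have : pvPmin arr n m + 1 ≤ pvPlus arr n j := by
        rcases lt_or_eq_of_le hple with h | h
        · omega
        · exact absurd h.symm hp
      omega

theorem rowcost_attained (arr : List (List String)) (n m i : Int) (hm : 0 < m) :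
    ∃ j, 0 ≤ j ∧ j < m ∧ pvCost arr n m i j = pvRowcost arr n m i := by
  unfold pvRowcost pvInc
  cases ha : (pvAmin arr n m).any (fun j => !(pvCell arr i j == "?")) with
  | true =>
    obtain ⟨j, hjam, hjp⟩ := List.any_eq_true.1 ha
    obtain ⟨⟨h0, hj⟩, hpl⟩ := (mem_amin arr n m j).1 hjam
    refine ⟨j, h0, hj, ?_⟩
    have hcq : pvCell arr i j ≠ "?" := by
      intro h
      simp [h] at hjp
    have : pvQ arr i j = 0 := by unfold pvQ; rw [if_neg hcq]
    unfold pvCost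
    simp only [if_pos]
    omega
  | false =>
    obtain ⟨j, h0, hj, hpl⟩ := pmin_attained arr n m hm
    refine ⟨j, h0, hj, ?_⟩
    have hjam : j ∈ pvAmin arr n m := (mem_amin arr n m j).2 ⟨⟨h0, hj⟩, hpl⟩
    have hall := List.any_eq_false.1 ha _ hjam
    have hcq : pvCell arr i j = "?" := by
      by_contra hne
      exact hall (by simp [hne])
    have : pvQ arr i j = 1 := by unfold pvQ; rw [if_pos hcq]
    unfold pvCost
    simp only [Bool.false_eq_true, if_neg, not_false_eq_true]
    omega

theorem opt_fold (l : List Int) (g : Int → Int) (b : Int) :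
    l.foldl (fun (best : Option Int) i =>
        match best with
        | none => some (g i)
        | some b => if g i < b then some (g i) else some b) (some b)
      = some (l.foldl (fun a i => min a (g i)) b) := by
  induction l generalizing b with
  | nil => simp
  | cons i t ih =>
    simp only [List.foldl_cons]
    rw [show (if g i < b then some (g i) else some b) = some (min b (g i)) from by
      rcases le_total (g i) b with h | h <;> simp [h] <;> omega]
    exact ih (min b (g i))

theorem B_eq (arr : List (List String)) (n m : Int) (hn : 0 < n) (hm : 0 < m) :
    find_max_in_list_alt arr n m
      = n + m - 2 * ((PySem.List.pyRange 0 n 1).flatMap (fun i =>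
          (PySem.List.pyRange 0 m 1).map (fun j => pvCost arr n m i j))).foldl min
            (pvCost arr n m 0 0) := by
  have hB : find_max_in_list_alt arr n m
      = n + m - 2 * (((PySem.List.pyRange 0 n 1).foldl (fun (best : Option Int) i =>
          match best with
          | none => some (pvRowcost arr n m i)
          | some b => if pvRowcost arr n m i < b then some (pvRowcost arr n m i) else some b)
          none).getD 0) := rfl
  rw [hB]
  rw [PySem.List.pyRange_one_cons hn, List.foldl_cons]
  rw [opt_fold]
  rw [← nested_foldl min _ _ (fun i j => pvCost arr n m i j)]
  rw [List.foldl_cons]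
  have hinner : ∀ i a, (PySem.List.pyRange 0 m 1).foldl (fun a j => min a (pvCost arr n m i j)) a
      = min a (pvRowcost arr n m i) := by
    intro i a
    rw [← List.foldl_map (f := fun j => pvCost arr n m i j) (g := min)]
    apply foldl_min_of
    · obtain ⟨j, h0, hj, he⟩ := rowcost_attained arr n m i hm
      exact List.mem_map.2 ⟨j, PySem.List.mem_pyRange_one.2 ⟨h0, hj⟩, he⟩
    · intro x hx
      obtain ⟨j, hjr, hje⟩ := List.mem_map.1 hx
      obtain ⟨h0, hj⟩ := PySem.List.mem_pyRange_one.1 hjr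
      rw [← hje]
      exact rowcost_le arr n m i j h0 hj
  rw [hinner 0 (pvCost arr n m 0 0),
      min_eq_right (rowcost_le arr n m 0 0 le_rfl hm)]
  have := PySem.List.foldl_congr_mem (l := PySem.List.pyRange (0+1) n 1)
    (f := fun a i => (PySem.List.pyRange 0 m 1).foldl (fun a j => min a (pvCost arr n m i j)) a)
    (g := fun a i => min a (pvRowcost arr n m i))
    (pvRowcost arr n m 0) (fun a i _ => hinner i a)
  rw [this]
  simp only [Option.getD_some]
  norm_num

-- ===== VERDICT (by name: the statement is the Claim_ definition above) =====
theorem find_max_in_list_spec : Claim_equal_find_max_in_list := by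
  intro arr n m _ hpre
  obtain ⟨hn, hm, _, _⟩ := hpre
  unfold Spec_find_max_in_list
  rw [A_eq arr n m hn hm, B_eq arr n m hn hm]
  unfold pvBigMax
  rw [nested_foldl max _ _ (fun i j => pvScore arr n m i j)]
  have hmap : (PySem.List.pyRange 0 n 1).flatMap (fun i =>
        (PySem.List.pyRange 0 m 1).map (fun j => pvScore arr n m i j))
      = ((PySem.List.pyRange 0 n 1).flatMap (fun i =>
          (PySem.List.pyRange 0 m 1).map (fun j => pvCost arr n m i j))).map
            (fun c => n + m - 2 * c) := by
    rw [List.map_flatMap]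
    congr 1
    funext i
    rw [List.map_map]
    exact List.map_congr_left (fun j _ => score_eq_cost arr n m i j hn.le hm.le)
  rw [hmap, show pvScore arr n m 0 0 = n + m - 2 * pvCost arr n m 0 0 from
    score_eq_cost arr n m 0 0 hn.le hm.le, foldl_max_affine]
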